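-- pv_equiv track=rewrite | github.com/reschandreas/AdventOfCode | 2023/day11/main.py | get_lines_working
-- ===== SOURCE A (Python) =====
-- def get_lines_working(string: str) -> [([int], str)]:
--     lines = []
--     # expand rows
--     for line in string.splitlines():
--         if '#' not in line:
--             lines.append(line)
--         lines.append(line)
--     # expand columns
--     columns = []
--     for i in range(len(lines[0])):
--         column = []
--         for j in range(len(lines)):
--             column.append(lines[j][i])
--         columns.append(column)
--     lines = []
--     for column in columns:
--         stri = "".join(column)
--         if '#' not in stri:
--             lines.append(stri)
--         lines.append(stri)
--     columns = []
--     for i in range(len(lines[0])):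
--         column = []
--         for j in range(len(lines)):
--             column.append(lines[j][i])
--         columns.append(column)
--     new_lines = ["".join(c) for c in columns]
--     lines = []
--     for line in new_lines:
--         if '#' not in line:
--             lines.append((None, line))
--         else:
--             lines.append(([i for i, c in enumerate(line) if c == '#'], line))
--     return lines
-- ===== SOURCE B (Python) =====
-- def get_lines_working(string: str) -> [([int], str)]:
--     rows = string.splitlines()
--     num_cols = len(rows[0])
--     # a column is empty iff no row has '#' at that position (positional indexing,
--     # so short rows raise IndexError just like the original transpose would)
--     empty_cols = {i for i in range(num_cols)
--                   if all(rows[j][i] != '#' for j in range(len(rows)))}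
--     out = []
--     for row in rows:
--         expanded = "".join(c + c if i in empty_cols else c
--                            for i, c in enumerate(row[:num_cols]))
--         if '#' not in expanded:
--             entry = (None, expanded)
--         else:
--             entry = ([k for k, c in enumerate(expanded) if c == '#'], expanded)
--         if '#' not in row:
--             out.append(entry)
--         out.append(entry)
--     return out
-- ===== Notes on version B (the rewrite author's own statement) =====
-- stated objective: simpler
-- what changed: B drops A's two transpose-and-duplicate passes over column lists and instead computes the set of empty columns once, then builds each expanded row in a single direct pass, doubling characters of empty columns and doubling empty rows as it goes.
import Mathlib
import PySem

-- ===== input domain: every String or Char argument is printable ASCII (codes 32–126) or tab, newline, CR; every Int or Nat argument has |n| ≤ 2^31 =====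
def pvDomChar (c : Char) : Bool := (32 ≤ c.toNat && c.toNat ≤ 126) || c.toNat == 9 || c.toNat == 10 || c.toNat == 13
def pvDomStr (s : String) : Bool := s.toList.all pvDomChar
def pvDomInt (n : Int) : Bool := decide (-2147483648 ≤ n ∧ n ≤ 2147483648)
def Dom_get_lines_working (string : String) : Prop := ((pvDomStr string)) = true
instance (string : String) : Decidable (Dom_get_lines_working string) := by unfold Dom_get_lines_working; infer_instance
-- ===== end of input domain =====

-- B replaces A's double transpose-and-duplicate with one direct pass: it marks the empty
-- columns once and builds each expanded row by doubling characters in place (objective: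
-- simpler; same asymptotic cost).

-- ===== PORT A =====
-- Lines are represented as List Char ("".join over a list of single chars is the list
-- itself); indexing lines[j][i] uses pyGetD, exact wherever Python does not raise
-- (Pre_ excludes the raising inputs).

-- the row/column duplication loop: append once more when '#' is absent, then append
def pvA_dup (ls : List (List Char)) : List (List Char) :=
  ls.foldl (fun acc line =>
    acc ++ (if !PySem.Chars.isIn ['#'] line then [line, line] else [line])) []

-- the transpose loop: for i in range(len(ls[0])): for j in range(len(ls)): ls[j][i]
def pvA_transpose (ls : List (List Char)) : List (List Char) :=
  (PySem.List.pyRange 0 (PySem.List.len (PySem.List.pyGetD ls 0 []))).foldl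
    (fun cols i =>
      cols ++ [(PySem.List.pyRange 0 (PySem.List.len ls)).foldl
        (fun col j => col ++ [PySem.List.pyGetD (PySem.List.pyGetD ls j []) i ' ']) []])
    []

def get_lines_working (string : String) : List (Option (List Int) × String) :=
  let lines1 := pvA_dup ((PySem.Str.splitlines string).map String.toList)
  let new_lines := pvA_transpose (pvA_dup (pvA_transpose lines1))
  new_lines.foldl (fun acc line =>
    acc ++ [if !PySem.Chars.isIn ['#'] line then ((none : Option (List Int)), String.mk line)
            else (some (((PySem.List.enumerate line).filter (fun p => p.2 == '#')).map (fun p => p.1)),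
                  String.mk line)]) []

-- ===== PORT B =====
-- empty_cols = {i for i in range(num_cols) if all(rows[j][i] != '#' for j in range(len(rows)))}
def pvB_emptyCols (rows : List (List Char)) (numCols : Int) : PySem.Set Int :=
  PySem.Set.ofList ((PySem.List.pyRange 0 numCols).filter (fun i =>
    (PySem.List.pyRange 0 (PySem.List.len rows)).all (fun j =>
      PySem.List.pyGetD (PySem.List.pyGetD rows j []) i ' ' != '#')))

-- "".join(c + c if i in empty_cols else c for i, c in enumerate(row[:num_cols]))
def pvB_expand (emptyCols : PySem.Set Int) (numCols : Int) (row : List Char) : List Char :=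
  (PySem.List.enumerate (PySem.List.slice row none (some numCols))).foldl
    (fun acc ic => acc ++ (if ic.1 ∈ emptyCols then [ic.2, ic.2] else [ic.2])) []

def get_lines_working_alt (string : String) : List (Option (List Int) × String) :=
  let rows := (PySem.Str.splitlines string).map String.toList
  let numCols := PySem.List.len (PySem.List.pyGetD rows 0 [])
  let emptyCols := pvB_emptyCols rows numCols
  rows.foldl (fun out row =>
    let expanded := pvB_expand emptyCols numCols row
    let entry := if !PySem.Chars.isIn ['#'] expanded then ((none : Option (List Int)), String.mk expanded)
                 else (some (((PySem.List.enumerate expanded).filter (fun p => p.2 == '#')).map (fun p => p.1)),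
                       String.mk expanded)
    (if !PySem.Chars.isIn ['#'] row then out ++ [entry] else out) ++ [entry]) []

-- ===== PRECONDITION & SPEC =====
-- Pre_ holds exactly where Python A returns normally: A raises IndexError when the input
-- has no lines, when the first line is empty, or when some line is shorter than the first.
def Pre_get_lines_working (string : String) : Prop :=
  0 < (((PySem.Str.splitlines string).map String.toList).headD []).length ∧
  ∀ l ∈ (PySem.Str.splitlines string).map String.toList,
    (((PySem.Str.splitlines string).map String.toList).headD []).length ≤ l.length
instance (string : String) : Decidable (Pre_get_lines_working string) := by
  unfold Pre_get_lines_working; infer_instance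

def pvWitness_get_lines_working : String := "#..\n.#."

def Spec_get_lines_working (string : String) (out : List (Option (List Int) × String)) : Prop := out = get_lines_working_alt string
instance (string : String) (out : List (Option (List Int) × String)) : Decidable (Spec_get_lines_working string out) := by unfold Spec_get_lines_working; infer_instance

-- ===== CLAIM (what is proved, stated in full; the proofs are below) =====
def Claim_equal_get_lines_working : Prop := ∀ (string : String), Dom_get_lines_working string → Pre_get_lines_working string → Spec_get_lines_working string (get_lines_working string)

-- ===== LEMMAS AND PROOFS =====

-- proof-side canonical forms
def pvDupF (l : List Char) : List (List Char) :=
  if !PySem.Chars.isIn ['#'] l then [l, l] else [l]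

def pvMark (l : List Char) : Option (List Int) × String :=
  if !PySem.Chars.isIn ['#'] l then ((none : Option (List Int)), String.mk l)
  else (some (((PySem.List.enumerate l).filter (fun p => p.2 == '#')).map (fun p => p.1)),
        String.mk l)

def pvColAt (ls : List (List Char)) (j : Int) : List Char :=
  ls.map (fun l => PySem.List.pyGetD l j ' ')

def pvColEmpty (rows : List (List Char)) (j : Int) : Bool :=
  rows.all (fun r => PySem.List.pyGetD r j ' ' != '#')

def pvE (rows : List (List Char)) (n : Nat) (r : List Char) : List Char :=
  (PySem.List.pyRange 0 (n : Int)).flatMap (fun j =>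
    if pvColEmpty rows j then [PySem.List.pyGetD r j ' ', PySem.List.pyGetD r j ' ']
    else [PySem.List.pyGetD r j ' '])

theorem pvA_dup_eq (ls : List (List Char)) : pvA_dup ls = ls.flatMap pvDupF := by
  simpa only [List.nil_append] using PySem.List.foldl_append_eq_flatMap pvDupF ls []

theorem pv_getD_zero_headD {α : Type} (l : List α) (d : α) : l.getD 0 d = l.headD d := by
  cases l <;> simp

theorem pvA_transpose_eq (ls : List (List Char)) :
    pvA_transpose ls = (PySem.List.pyRange 0 (PySem.List.len (ls.headD []))).map
      (fun i => pvColAt ls i) := by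
  unfold pvA_transpose
  rw [PySem.List.pyGetD_zero, pv_getD_zero_headD,
      PySem.List.foldl_append_singleton_eq_map]
  refine (List.nil_append _).trans (List.map_congr_left ?_)
  intro i _
  rw [PySem.List.foldl_pyRange_zero_pyGetD ls [] (fun col l => col ++ [PySem.List.pyGetD l i ' ']) [],
      PySem.List.foldl_append_singleton_eq_map]
  simp [pvColAt]

theorem pvDup_headD (ls : List (List Char)) : (ls.flatMap pvDupF).headD [] = ls.headD [] := by
  cases ls with
  | nil => rfl
  | cons r t => unfold pvDupF; by_cases h : PySem.Chars.isIn ['#'] r <;> simp [h]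

theorem pv_mem_dupF {x r : List Char} : x ∈ pvDupF r ↔ x = r := by
  unfold pvDupF; by_cases h : PySem.Chars.isIn ['#'] r <;> simp [h]

theorem pv_isIn_colAt_dup (ls : List (List Char)) (j : Int) :
    PySem.Chars.isIn ['#'] (pvColAt (ls.flatMap pvDupF) j) =
    PySem.Chars.isIn ['#'] (pvColAt ls j) := by
  rw [Bool.eq_iff_iff]
  simp only [PySem.Chars.isIn_iff_infix, List.singleton_infix_iff, pvColAt, List.mem_map,
    List.mem_flatMap]
  constructor
  · rintro ⟨l, ⟨r, hr, hlr⟩, he⟩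
    exact ⟨r, hr, by rwa [pv_mem_dupF.mp hlr] at he⟩
  · rintro ⟨r, hr, he⟩
    exact ⟨r, ⟨r, hr, by unfold pvDupF; split <;> simp⟩, he⟩

theorem pv_isIn_colAt (rows : List (List Char)) (j : Int) :
    PySem.Chars.isIn ['#'] (pvColAt rows j) = !pvColEmpty rows j := by
  rw [Bool.eq_iff_iff]
  simp only [PySem.Chars.isIn_iff_infix, List.singleton_infix_iff, pvColAt, pvColEmpty,
    List.mem_map, Bool.not_eq_true', List.all_eq_false, bne_iff_ne, ne_eq, not_not]

theorem pv_pyGetD_nil {a : Type} (j : Int) (d : a) : PySem.List.pyGetD ([] : List a) j d = d := by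
  simp [PySem.List.pyGetD, PySem.List.pyGet?]

theorem pvDupF_map {b : Type} (g : List Char → b) (c : List Char) :
    (pvDupF c).map g = if !PySem.Chars.isIn ['#'] c then [g c, g c] else [g c] := by
  unfold pvDupF; split <;> simp

theorem pv_emptyCols_mem (rows : List (List Char)) (n : Nat) (j : Int)
    (h0 : 0 ≤ j) (h1 : j < (n : Int)) :
    (j ∈ pvB_emptyCols rows (n : Int)) ↔ (pvColEmpty rows j = true) := by
  unfold pvB_emptyCols
  rw [PySem.Set.mem_ofList, List.mem_filter]
  have hall : (List.all (PySem.List.pyRange 0 (PySem.List.len rows))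
      (fun j' => PySem.List.pyGetD (PySem.List.pyGetD rows j' []) j ' ' != '#')) = pvColEmpty rows j := by
    unfold pvColEmpty
    conv_rhs => rw [← PySem.List.map_pyGetD_pyRange_zero rows []]
    rw [List.all_map]
    rfl
  rw [hall]
  simp [PySem.List.mem_pyRange_one, h0, h1]

theorem pv_expandB (rows : List (List Char)) (row : List Char)
    (hrow : row ∈ rows)
    (hlen : ∀ r ∈ rows, (rows.headD []).length ≤ r.length) :
    pvB_expand (pvB_emptyCols rows ((rows.headD []).length : Int)) ((rows.headD []).length : Int) row
      = pvE rows (rows.headD []).length row := by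
  have hnr : (rows.headD []).length ≤ row.length := hlen row hrow
  unfold pvB_expand
  rw [PySem.List.slice_to_natCast]
  rw [PySem.List.enumerate_eq_map_pyRange _ ' ']
  have hlrow : (PySem.List.len (row.take (rows.headD []).length)) = ((rows.headD []).length : Int) := by
    show ((row.take (rows.headD []).length).length : Int) = _
    rw [List.length_take, Nat.min_eq_left hnr]
  rw [hlrow, List.foldl_map]
  show List.foldl (fun acc j => acc ++
      (if j ∈ pvB_emptyCols rows ((rows.headD []).length : Int) then
        [PySem.List.pyGetD (row.take (rows.headD []).length) j ' ',
         PySem.List.pyGetD (row.take (rows.headD []).length) j ' ']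
       else [PySem.List.pyGetD (row.take (rows.headD []).length) j ' '])) []
      (PySem.List.pyRange 0 ((rows.headD []).length : Int)) = _
  rw [PySem.List.foldl_append_eq_flatMap, List.nil_append]
  unfold pvE
  apply List.flatMap_congr
  intro j hj
  rw [PySem.List.mem_pyRange_one] at hj
  have hc : PySem.List.pyGetD (row.take (rows.headD []).length) j ' ' = PySem.List.pyGetD row j ' ' := by
    rw [PySem.List.pyGetD_eq_getElem _ ' ' hj.1
          (by rw [List.length_take, Nat.min_eq_left hnr]; exact hj.2),
        PySem.List.pyGetD_eq_getElem _ ' ' hj.1 (by omega)]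
    exact List.getElem_take
  rw [hc]
  have hiff := pv_emptyCols_mem rows (rows.headD []).length j hj.1 hj.2
  by_cases hj2 : pvColEmpty rows j = true
  · rw [if_pos (hiff.mpr hj2), if_pos hj2]
  · rw [if_neg (fun h => hj2 (hiff.mp h)), if_neg hj2]

theorem pv_colAt_lines2 (rows : List (List Char)) (i : Int) :
    pvColAt (((PySem.List.pyRange 0 ((rows.headD []).length : Int)).map
        (fun j => pvColAt (rows.flatMap pvDupF) j)).flatMap pvDupF) i =
      pvE rows (rows.headD []).length (PySem.List.pyGetD (rows.flatMap pvDupF) i []) := by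
  show (((PySem.List.pyRange 0 ((rows.headD []).length : Int)).map
        (fun j => pvColAt (rows.flatMap pvDupF) j)).flatMap pvDupF).map
      (fun l => PySem.List.pyGetD l i ' ') = _
  rw [List.map_flatMap, List.flatMap_map]
  unfold pvE
  apply List.flatMap_congr
  intro j hj
  rw [pvDupF_map]
  rw [pv_isIn_colAt_dup, pv_isIn_colAt, Bool.not_not]
  have hg : PySem.List.pyGetD (pvColAt (rows.flatMap pvDupF) j) i ' '
      = PySem.List.pyGetD (PySem.List.pyGetD (rows.flatMap pvDupF) i []) j ' ' := by
    have h := PySem.List.pyGetD_map (fun l => PySem.List.pyGetD l j ' ') (rows.flatMap pvDupF) i []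
    simpa [pvColAt, pv_pyGetD_nil] using h
  rw [hg]

theorem pvA_eq (rows : List (List Char)) (hpos : 0 < (rows.headD []).length) :
    pvA_transpose (pvA_dup (pvA_transpose (pvA_dup rows)))
      = (rows.flatMap pvDupF).map (pvE rows (rows.headD []).length) := by
  rw [pvA_dup_eq rows, pvA_transpose_eq (rows.flatMap pvDupF), pvDup_headD]
  have hnn : PySem.List.len (rows.headD []) = ((rows.headD []).length : Int) := rfl
  rw [hnn]
  rw [pvA_dup_eq, pvA_transpose_eq]
  have hr0 : PySem.List.pyRange 0 ((rows.headD []).length : Int)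
      = 0 :: PySem.List.pyRange 1 ((rows.headD []).length : Int) :=
    PySem.List.pyRange_one_cons (by exact_mod_cast hpos)
  have hhead : ((((PySem.List.pyRange 0 ((rows.headD []).length : Int)).map
      (fun j => pvColAt (rows.flatMap pvDupF) j)).flatMap pvDupF).headD [])
      = pvColAt (rows.flatMap pvDupF) 0 := by
    rw [pvDup_headD, hr0]; simp
  rw [hhead]
  have hlen2 : PySem.List.len (pvColAt (rows.flatMap pvDupF) 0)
      = PySem.List.len (rows.flatMap pvDupF) := by
    simp [pvColAt, PySem.List.len]
  rw [hlen2]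
  rw [List.map_congr_left (fun i _ => pv_colAt_lines2 rows i)]
  rw [show (fun i => pvE rows (rows.headD []).length (PySem.List.pyGetD (rows.flatMap pvDupF) i []))
      = (pvE rows (rows.headD []).length) ∘ (fun i => PySem.List.pyGetD (rows.flatMap pvDupF) i []) from rfl]
  rw [← List.map_map, PySem.List.map_pyGetD_pyRange_zero]

theorem pv_main (rows : List (List Char))
    (hpos : 0 < (rows.headD []).length)
    (hlen : ∀ r ∈ rows, (rows.headD []).length ≤ r.length) :
    (pvA_transpose (pvA_dup (pvA_transpose (pvA_dup rows)))).foldl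
      (fun acc line => acc ++ [pvMark line]) [] =
    rows.foldl (fun out row =>
      (if !PySem.Chars.isIn ['#'] row then
        out ++ [pvMark (pvB_expand (pvB_emptyCols rows (PySem.List.len (PySem.List.pyGetD rows 0 []))) (PySem.List.len (PySem.List.pyGetD rows 0 [])) row)]
       else out) ++
      [pvMark (pvB_expand (pvB_emptyCols rows (PySem.List.len (PySem.List.pyGetD rows 0 []))) (PySem.List.len (PySem.List.pyGetD rows 0 [])) row)]) [] := by
  have hnum : PySem.List.len (PySem.List.pyGetD rows 0 []) = ((rows.headD []).length : Int) := by
    rw [PySem.List.pyGetD_zero, pv_getD_zero_headD]; rfl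
  rw [PySem.List.foldl_append_singleton_eq_map pvMark, List.nil_append]
  rw [pvA_eq rows hpos, List.map_map, List.map_flatMap]
  rw [hnum]
  rw [PySem.List.foldl_congr_mem rows _
    (fun out row => out ++ (if !PySem.Chars.isIn ['#'] row then
        [pvMark (pvB_expand (pvB_emptyCols rows ((rows.headD []).length : Int)) ((rows.headD []).length : Int) row),
         pvMark (pvB_expand (pvB_emptyCols rows ((rows.headD []).length : Int)) ((rows.headD []).length : Int) row)]
      else [pvMark (pvB_expand (pvB_emptyCols rows ((rows.headD []).length : Int)) ((rows.headD []).length : Int) row)])) []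
    (by intro acc x hx; by_cases h : PySem.Chars.isIn ['#'] x <;> simp [h])]
  rw [PySem.List.foldl_append_eq_flatMap, List.nil_append]
  apply List.flatMap_congr
  intro r hr
  rw [pvDupF_map, pv_expandB rows r hr hlen]
  split <;> rfl

-- ===== VERDICT (by name: the statement is the Claim_ definition above) =====
theorem get_lines_working_spec : Claim_equal_get_lines_working := by
  intro s _ hpre
  unfold Spec_get_lines_working get_lines_working get_lines_working_alt
  obtain ⟨h1, h2⟩ := hpre
  exact pv_main ((PySem.Str.splitlines s).map String.toList) h1 h2
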